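-- pv_equiv track=rewrite | github.com/battower/WaveCollapse_ | common/square_grid.py | intersect_squares
-- ===== SOURCE A (Python) =====
-- def intersect_squares(N):
--     for ay in range(-1 * N + 1, N):
--         for ax in range(-1 * N + 1, N):
--             if ax == 0 and ay == 0:
--                 continue
--             else:
--                 xys = tuple((xy for xy in intersect((0, 0), (ax, ay), N)))
--                 yield (ax, ay), xys
--
-- def intersect(a, b, N):
--     ax, ay = a
--     bx, by = b
--     width, height = N, N
--     xmin = min(ax, bx)
--     ymin = min(ay, by)
--
--     for j in range(ymin, ymin + height + 1):
--         for k in range(xmin, xmin + width + 1):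
--             if ax <= k < ax + width and bx <= k < bx + width:
--                 if ay <= j < ay + height and by <= j < by + height:
--                     yield k, j
-- ===== SOURCE B (Python) =====
-- def intersect_squares(N):
--     for ay in range(-N + 1, N):
--         for ax in range(-N + 1, N):
--             if ax == 0 and ay == 0:
--                 continue
--             xlo, xhi = max(0, ax), min(N, ax + N)
--             ylo, yhi = max(0, ay), min(N, ay + N)
--             yield (ax, ay), tuple(
--                 (k, j) for j in range(ylo, yhi) for k in range(xlo, xhi)
--             )
-- ===== Notes on version B (the rewrite author's own statement) =====
-- stated objective: simpler
-- what changed: B computes the overlap rectangle's exact bounds (max/min of the two squares' edges) and iterates only over it, replacing A's scan of the whole (N+1)x(N+1) bounding region with a per-cell membership filter.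
import Mathlib
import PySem

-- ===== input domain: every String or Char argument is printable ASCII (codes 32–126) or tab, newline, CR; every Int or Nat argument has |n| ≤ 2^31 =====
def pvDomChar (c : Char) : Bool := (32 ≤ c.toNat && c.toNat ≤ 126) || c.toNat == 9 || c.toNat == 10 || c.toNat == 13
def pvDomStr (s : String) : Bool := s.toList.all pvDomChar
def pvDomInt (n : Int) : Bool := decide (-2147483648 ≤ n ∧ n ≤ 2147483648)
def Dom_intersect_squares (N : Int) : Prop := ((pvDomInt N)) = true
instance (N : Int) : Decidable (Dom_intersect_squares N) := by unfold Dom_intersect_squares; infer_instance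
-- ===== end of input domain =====

-- B computes the exact overlap rectangle bounds directly and iterates only over it,
-- instead of A's scan of the full (N+1)x(N+1) region with a membership filter (objective: simpler).

-- ===== PORT A =====
-- helper 'intersect' of A: scan the bounding region, filter membership in both squares
def intersectA (a b : Int × Int) (N : Int) : List (Int × Int) :=
  let ax := a.1; let ay := a.2
  let bx := b.1; let by_ := b.2
  let width := N; let height := N
  let xmin := min ax bx
  let ymin := min ay by_
  (PySem.List.pyRange ymin (ymin + height + 1) 1).flatMap (fun j =>
    (PySem.List.pyRange xmin (xmin + width + 1) 1).flatMap (fun k =>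
      if (ax ≤ k ∧ k < ax + width) ∧ (bx ≤ k ∧ k < bx + width) then
        if (ay ≤ j ∧ j < ay + height) ∧ (by_ ≤ j ∧ j < by_ + height) then
          [(k, j)]
        else []
      else []))

def intersect_squares (N : Int) : List ((Int × Int) × (List (Int × Int))) :=
  (PySem.List.pyRange (-1 * N + 1) N 1).flatMap (fun ay =>
    (PySem.List.pyRange (-1 * N + 1) N 1).flatMap (fun ax =>
      if ax = 0 ∧ ay = 0 then []
      else [((ax, ay), intersectA (0, 0) (ax, ay) N)]))

-- ===== PORT B =====
def intersect_squares_alt (N : Int) : List ((Int × Int) × (List (Int × Int))) :=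
  (PySem.List.pyRange (-N + 1) N 1).flatMap (fun ay =>
    (PySem.List.pyRange (-N + 1) N 1).flatMap (fun ax =>
      if ax = 0 ∧ ay = 0 then []
      else
        let xlo := max 0 ax; let xhi := min N (ax + N)
        let ylo := max 0 ay; let yhi := min N (ay + N)
        [((ax, ay),
          (PySem.List.pyRange ylo yhi 1).flatMap (fun j =>
            (PySem.List.pyRange xlo xhi 1).map (fun k => (k, j))))]))

-- ===== PRECONDITION & SPEC =====
def Spec_intersect_squares (N : Int) (out : List ((Int × Int) × (List (Int × Int)))) : Prop := out = intersect_squares_alt N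
instance (N : Int) (out : List ((Int × Int) × (List (Int × Int)))) : Decidable (Spec_intersect_squares N out) := by unfold Spec_intersect_squares; infer_instance

-- ===== CLAIM (what is proved, stated in full; the proofs are below) =====
def Claim_equal_intersect_squares : Prop := ∀ (N : Int), Dom_intersect_squares N → Spec_intersect_squares N (intersect_squares N)

-- ===== LEMMAS AND PROOFS =====

-- a flatMap over a range guarded by an interval condition equals the flatMap over the sub-range
lemma flatMap_ite_range {α : Type} (lo hi lo' hi' : Int) (g : Int → List α)
    (P : Int → Prop) [DecidablePred P] (hP : ∀ k, P k ↔ lo' ≤ k ∧ k < hi')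
    (h1 : lo ≤ lo') (h2 : lo' ≤ hi') (h3 : hi' ≤ hi) :
    ((PySem.List.pyRange lo hi 1).flatMap fun k => if P k then g k else []) =
      (PySem.List.pyRange lo' hi' 1).flatMap g := by
  rw [PySem.List.pyRange_one_append lo lo' hi h1 (le_trans h2 h3),
      PySem.List.pyRange_one_append lo' hi' hi h2 h3]
  simp only [List.flatMap_append]
  have e1 : ((PySem.List.pyRange lo lo' 1).flatMap fun k => if P k then g k else []) = [] := by
    rw [List.flatMap_eq_nil_iff]
    intro k hk
    rw [PySem.List.mem_pyRange_one] at hk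
    have hnp : ¬ P k := by rw [hP]; omega
    simp [hnp]
  have e3 : ((PySem.List.pyRange hi' hi 1).flatMap fun k => if P k then g k else []) = [] := by
    rw [List.flatMap_eq_nil_iff]
    intro k hk
    rw [PySem.List.mem_pyRange_one] at hk
    have hnp : ¬ P k := by rw [hP]; omega
    simp [hnp]
  have e2 : ((PySem.List.pyRange lo' hi' 1).flatMap fun k => if P k then g k else []) =
      (PySem.List.pyRange lo' hi' 1).flatMap g := by
    apply List.flatMap_congr
    intro k hk
    rw [PySem.List.mem_pyRange_one] at hk
    simp [hP k, hk.1, hk.2]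
  rw [e1, e2, e3, List.nil_append, List.append_nil]

-- on every offset in range, A's scan-and-filter equals B's direct rectangle
lemma inner_eq (N ax ay : Int) (hax : -1 * N + 1 ≤ ax ∧ ax < N) (hay : -1 * N + 1 ≤ ay ∧ ay < N) :
    intersectA (0, 0) (ax, ay) N =
      (PySem.List.pyRange (max 0 ay) (min N (ay + N)) 1).flatMap (fun j =>
        (PySem.List.pyRange (max 0 ax) (min N (ax + N)) 1).map (fun k => (k, j))) := by
  unfold intersectA
  simp only []
  have hy : ((PySem.List.pyRange (min 0 ay) (min 0 ay + N + 1) 1).flatMap fun j =>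
      (PySem.List.pyRange (min 0 ax) (min 0 ax + N + 1) 1).flatMap fun k =>
        if (0 ≤ k ∧ k < 0 + N) ∧ (ax ≤ k ∧ k < ax + N) then
          if (0 ≤ j ∧ j < 0 + N) ∧ (ay ≤ j ∧ j < ay + N) then [(k, j)] else []
        else []) =
      (PySem.List.pyRange (min 0 ay) (min 0 ay + N + 1) 1).flatMap fun j =>
        if (0 ≤ j ∧ j < 0 + N) ∧ (ay ≤ j ∧ j < ay + N) then
          ((PySem.List.pyRange (min 0 ax) (min 0 ax + N + 1) 1).flatMap fun k =>
            if (0 ≤ k ∧ k < 0 + N) ∧ (ax ≤ k ∧ k < ax + N) then [(k, j)] else [])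
        else [] := by
    apply List.flatMap_congr
    intro j _
    by_cases hj : (0 ≤ j ∧ j < 0 + N) ∧ (ay ≤ j ∧ j < ay + N)
    · rw [if_pos hj]
      apply List.flatMap_congr
      intro k _
      rw [if_pos hj]  -- hj is independent of k
    · rw [if_neg hj, List.flatMap_eq_nil_iff]
      intro k _
      by_cases hk : (0 ≤ k ∧ k < 0 + N) ∧ (ax ≤ k ∧ k < ax + N)
      · rw [if_pos hk, if_neg hj]
      · rw [if_neg hk]
  rw [hy]
  rw [flatMap_ite_range (min 0 ay) (min 0 ay + N + 1) (max 0 ay) (min N (ay + N)) _ _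
        (fun j => by constructor <;> (intro h; omega)) (by omega) (by omega) (by omega)]
  apply List.flatMap_congr
  intro j _
  rw [flatMap_ite_range (min 0 ax) (min 0 ax + N + 1) (max 0 ax) (min N (ax + N)) _ _
        (fun k => by constructor <;> (intro h; omega)) (by omega) (by omega) (by omega)]
  exact (List.map_eq_flatMap).symm

-- ===== VERDICT (by name: the statement is the Claim_ definition above) =====
theorem intersect_squares_spec : Claim_equal_intersect_squares := by
  intro N _
  unfold Spec_intersect_squares intersect_squares intersect_squares_alt
  have hr : -N + 1 = -1 * N + 1 := by ring
  rw [hr]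
  apply List.flatMap_congr
  intro ay hay
  rw [PySem.List.mem_pyRange_one] at hay
  apply List.flatMap_congr
  intro ax hax
  rw [PySem.List.mem_pyRange_one] at hax
  by_cases h0 : ax = 0 ∧ ay = 0
  · simp [h0]
  · simp only [h0, if_false]
    rw [inner_eq N ax ay hax hay]
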